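-- pv_equiv track=rewrite | github.com/Yawn-Sean/Daily_CF_Problems | daily_problems/2026/02/0226/personal_submission/cf103940l_liryc.py | solve
-- ===== SOURCE A (Python) =====
-- def solve(k):
--     MOD = 1000000007
--     dp = [0] * (k + 1)
--     dp[1] = 1
--     prefix = [0] * (k + 1)
--     prefix[1] = 1
--     for t in range(2, k + 1):
--         half = t + 1 >> 1
--         if half >= 1:
--             dp[t] = (prefix[t - 1] - prefix[half - 1]) % MOD
--         else:
--             dp[t] = 0
--         prefix[t] = (prefix[t - 1] + dp[t]) % MOD
--     return dp[k]
-- ===== SOURCE B (Python) =====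
-- def solve(k):
--     MOD = 1000000007
--     dp = [0] * (k + 1)
--     dp[1] = 1
--     window = 0   # running sum dp[lo..t-2] at loop head, before adding dp[t-1]
--     lo = 1
--     for t in range(2, k + 1):
--         window += dp[t - 1]
--         half = t + 1 >> 1
--         while lo < half:
--             window -= dp[lo]
--             lo += 1
--         dp[t] = window % MOD
--     return dp[k]
-- ===== Notes on version B (the rewrite author's own statement) =====
-- stated objective: alternative
-- what changed: Replaces the explicit prefix-sum table and its modular subtraction with a single incrementally-maintained sliding-window sum of dp[half(t)..t-1] (state: running sum + left pointer advanced by an inner while loop), so the second array disappears.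
-- outside the precondition, e.g. on solve(0): A raises IndexError, B raises IndexError
import Mathlib
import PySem

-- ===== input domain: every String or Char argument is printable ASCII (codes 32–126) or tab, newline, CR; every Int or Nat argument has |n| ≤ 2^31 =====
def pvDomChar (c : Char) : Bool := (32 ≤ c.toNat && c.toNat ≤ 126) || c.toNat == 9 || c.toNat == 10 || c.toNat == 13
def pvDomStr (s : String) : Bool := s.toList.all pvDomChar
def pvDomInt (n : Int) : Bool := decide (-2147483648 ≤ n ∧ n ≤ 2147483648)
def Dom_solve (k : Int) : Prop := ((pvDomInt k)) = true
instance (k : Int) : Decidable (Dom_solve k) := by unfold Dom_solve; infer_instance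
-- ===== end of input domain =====

-- B replaces A's prefix-sum table and modular subtraction by a single running sliding-window sum
-- dp[half(t)..t-1] maintained with a left pointer (objective: alternative).

-- Python lists here are random-access and updated in place: both ports model them as Array Int.
-- Reads/writes are exact for 0 ≤ i < size — every access both programs make under Pre_solve
-- (Python raises IndexError outside that range; Pre_solve excludes those inputs).
def pyAGet (dp : Array Int) (i : Int) : Int := dp.getD i.toNat 0
def pyASet (dp : Array Int) (i : Int) (v : Int) : Array Int := dp.setIfInBounds i.toNat v

-- ===== PORT A =====
-- loop body of A's for-loop, state = (dp, prefix)
def solveStepA (st : Array Int × Array Int) (t : Int) : Array Int × Array Int :=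
  match st with
  | (dp, pre) =>
    let half := (t + 1) >>> (1 : Nat)
    let dp' := if half ≥ 1 then
        pyASet dp t (PySem.Int.mod (pyAGet pre (t - 1) - pyAGet pre (half - 1)) 1000000007)
      else pyASet dp t 0
    (dp', pyASet pre t (PySem.Int.mod (pyAGet pre (t - 1) + pyAGet dp' t) 1000000007))

def solve (k : Int) : Int :=
  let dp := pyASet (Array.replicate (k + 1).toNat 0) 1 1
  let pre := pyASet (Array.replicate (k + 1).toNat 0) 1 1
  let st := (PySem.List.pyRange 2 (k + 1) 1).foldl solveStepA (dp, pre)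
  pyAGet st.1 k

-- ===== PORT B =====
-- B's inner while loop: advance lo to half, subtracting the elements that drop off the window
def solveShrinkB (dp : Array Int) (half : Int) (w lo : Int) : Int × Int :=
  if h : lo < half then solveShrinkB dp half (w - pyAGet dp lo) (lo + 1)
  else (w, lo)
termination_by (half - lo).toNat
decreasing_by omega

-- loop body of B's for-loop, state = (dp, window, lo)
def solveStepB (st : Array Int × Int × Int) (t : Int) : Array Int × Int × Int :=
  match st with
  | (dp, w0, lo0) =>
    let w := w0 + pyAGet dp (t - 1)
    let half := (t + 1) >>> (1 : Nat)
    let p := solveShrinkB dp half w lo0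
    (pyASet dp t (PySem.Int.mod p.1 1000000007), p.1, p.2)

def solve_alt (k : Int) : Int :=
  let dp := pyASet (Array.replicate (k + 1).toNat 0) 1 1
  let st := (PySem.List.pyRange 2 (k + 1) 1).foldl solveStepB (dp, 0, 1)
  pyAGet st.1 k

-- ===== PRECONDITION & SPEC =====
-- A raises IndexError (dp[1] = 1 on a list of length k+1 ≤ 1) whenever k ≤ 0; B raises there too.
def Pre_solve (k : Int) : Prop := 1 ≤ k
instance (k : Int) : Decidable (Pre_solve k) := by unfold Pre_solve; infer_instance
def pvWitness_solve : Int := 5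

def Spec_solve (k : Int) (out : Int) : Prop := out = solve_alt k
instance (k : Int) (out : Int) : Decidable (Spec_solve k out) := by unfold Spec_solve; infer_instance

-- ===== CLAIM (what is proved, stated in full; the proofs are below) =====
def Claim_equal_solve : Prop := ∀ (k : Int), Dom_solve k → Pre_solve k → Spec_solve k (solve k)

-- ===== LEMMAS AND PROOFS =====

-- sum of dp[a..b-1]
def sumR (dp : Array Int) (a b : Int) : Int :=
  ((PySem.List.pyRange a b 1).map (fun i => pyAGet dp i)).sum

lemma shift_one (n : Int) : n >>> (1 : Nat) = n / 2 := by
  have := Int.shiftRight_eq_div_pow n 1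
  simpa using this

lemma size_pyASet (xs : Array Int) (t v : Int) : (pyASet xs t v).size = xs.size := by
  simp [pyASet]

lemma aget_aset_ne (xs : Array Int) (i t v : Int) (h0 : 0 ≤ i) (ht : 0 ≤ t) (hne : i ≠ t) :
    pyAGet (pyASet xs t v) i = pyAGet xs i := by
  simp only [pyAGet, pyASet, Array.getD_eq_getD_getElem?, Array.getElem?_setIfInBounds]
  rw [if_neg (by omega)]

lemma aget_aset_self (xs : Array Int) (t v : Int) (ht : 0 ≤ t) (hl : t < (xs.size : Int)) :
    pyAGet (pyASet xs t v) t = v := by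
  simp only [pyAGet, pyASet, Array.getD_eq_getD_getElem?, Array.getElem?_setIfInBounds]
  rw [if_pos trivial, if_pos (by omega)]
  rfl

lemma aget_replicate (n : Nat) (i : Int) : pyAGet (Array.replicate n 0) i = 0 := by
  simp only [pyAGet, Array.getD_eq_getD_getElem?, Array.getElem?_replicate]
  split <;> rfl

lemma sumR_nil (dp : Array Int) (a b : Int) (h : b ≤ a) : sumR dp a b = 0 := by
  simp [sumR, PySem.List.pyRange_one_eq_nil h]

lemma sumR_succ_right (dp : Array Int) (a b : Int) (h : a ≤ b) :
    sumR dp a (b + 1) = sumR dp a b + pyAGet dp b := by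
  simp [sumR, PySem.List.pyRange_one_succ_right h]

lemma sumR_cons (dp : Array Int) (a b : Int) (h : a < b) :
    sumR dp a b = pyAGet dp a + sumR dp (a + 1) b := by
  simp [sumR, PySem.List.pyRange_one_cons h]

lemma sumR_split (dp : Array Int) (a m b : Int) (h1 : a ≤ m) (h2 : m ≤ b) :
    sumR dp a b = sumR dp a m + sumR dp m b := by
  simp [sumR, PySem.List.pyRange_one_append a m b h1 h2]

lemma sumR_setD_high (dp : Array Int) (a b t v : Int) (ha : 0 ≤ a) (hb : b ≤ t) :
    sumR (pyASet dp t v) a b = sumR dp a b := by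
  unfold sumR
  congr 1
  apply List.map_congr_left
  intro i hi
  rw [PySem.List.mem_pyRange_one] at hi
  exact aget_aset_ne dp i t v (by omega) (by omega) (by omega)

lemma solveShrinkB_sum (dp : Array Int) (t half : Int) (hht : half ≤ t) :
    ∀ (n : Nat) (lo : Int), (half - lo).toNat = n → lo ≤ half →
      solveShrinkB dp half (sumR dp lo t) lo = (sumR dp half t, half) := by
  intro n
  induction n with
  | zero =>
    intro lo hn hlo
    have : lo = half := by omega
    subst this
    rw [solveShrinkB]
    simp
  | succ m ih =>
    intro lo hn hlo
    have hlt : lo < half := by omega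
    rw [solveShrinkB]
    simp only [hlt, dif_pos]
    have hstep : sumR dp lo t - pyAGet dp lo = sumR dp (lo + 1) t := by
      rw [sumR_cons dp lo t (by omega)]; ring
    rw [hstep]
    exact ih (lo + 1) (by omega) (by omega)

-- the coupled invariant after processing t' = 2..t
def SolveInv (k t : Int) (a : Array Int × Array Int) (b : Array Int × Int × Int) : Prop :=
  a.1 = b.1 ∧
  a.1.size = (k + 1).toNat ∧
  a.2.size = (k + 1).toNat ∧
  b.2.2 = (t + 1) / 2 ∧
  b.2.1 = sumR b.1 ((t + 1) / 2) t ∧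
  ∀ i : Int, 0 ≤ i → i ≤ t →
    pyAGet a.2 i = sumR a.1 1 (i + 1) % 1000000007

lemma inv_init (k : Int) (hk : 1 ≤ k) :
    SolveInv k 1 (pyASet (Array.replicate (k + 1).toNat 0) 1 1,
             pyASet (Array.replicate (k + 1).toNat 0) 1 1)
            (pyASet (Array.replicate (k + 1).toNat 0) 1 1, 0, 1) := by
  have hN : ((k + 1).toNat : Int) = k + 1 := by omega
  have hlen : (pyASet (Array.replicate (k + 1).toNat (0:Int)) 1 1).size
      = (k + 1).toNat := by
    rw [size_pyASet, Array.size_replicate]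
  have hget1 : pyAGet (pyASet (Array.replicate (k + 1).toNat (0:Int)) 1 1) 1 = 1 := by
    apply aget_aset_self
    · omega
    · rw [Array.size_replicate]; omega
  refine ⟨rfl, hlen, hlen, by norm_num, ?_, ?_⟩
  · dsimp only
    norm_num
    rw [sumR_nil _ _ _ le_rfl]
  · intro i h0 h1
    dsimp only
    have : i = 0 ∨ i = 1 := by omega
    rcases this with h | h <;> subst h
    · rw [show (0:Int) + 1 = 1 by ring, sumR_nil _ _ _ le_rfl,
        aget_aset_ne _ _ _ _ le_rfl (by omega) (by omega), aget_replicate]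
      simp
    · rw [hget1, sumR_succ_right _ _ _ le_rfl, sumR_nil _ _ _ le_rfl, hget1]
      norm_num

lemma inv_step (k t : Int) (dpA preA dpB : Array Int) (wB loB : Int)
    (h1 : 1 ≤ t) (h2 : t < k) (hinv : SolveInv k t (dpA, preA) (dpB, wB, loB)) :
    SolveInv k (t + 1) (solveStepA (dpA, preA) (t + 1)) (solveStepB (dpB, wB, loB) (t + 1)) := by
  obtain ⟨hab, hla, hlp, hlo, hw, hpre⟩ := hinv
  dsimp only at hab hla hlp hlo hw hpre ⊢
  have hN : ((k + 1).toNat : Int) = k + 1 := by omega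
  have hlaZ : (dpA.size : Int) = k + 1 := by rw [hla, hN]
  have hlpZ : (preA.size : Int) = k + 1 := by rw [hlp, hN]
  have hshift : (t + 1 + 1) >>> (1 : Nat) = (t + 2) / 2 := by
    rw [shift_one]; ring_nf
  have hb1 : (1 : Int) ≤ (t + 2) / 2 := by omega
  have hb2 : (t + 1) / 2 ≤ (t + 2) / 2 := by omega
  have hb3 : (t + 2) / 2 ≤ t := by omega
  -- B: window after adding dp[t-1], then the while loop
  have hwsum : wB + pyAGet dpB (t + 1 - 1) = sumR dpB ((t + 1) / 2) (t + 1) := by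
    rw [hw, show t + 1 - 1 = t by ring, sumR_succ_right dpB _ t (by omega)]
  have hshrink : solveShrinkB dpB ((t + 2) / 2) (sumR dpB ((t + 1) / 2) (t + 1)) loB
      = (sumR dpB ((t + 2) / 2) (t + 1), (t + 2) / 2) := by
    rw [hlo]
    exact solveShrinkB_sum dpB (t + 1) ((t + 2) / 2) (by omega) _ ((t + 1) / 2) rfl hb2
  have hstepB : solveStepB (dpB, wB, loB) (t + 1)
      = (pyASet dpB (t + 1) (sumR dpB ((t + 2) / 2) (t + 1) % 1000000007),
         sumR dpB ((t + 2) / 2) (t + 1), (t + 2) / 2) := by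
    simp only [solveStepB, hshift, hwsum, hshrink]
    rw [PySem.Int.mod_eq_emod_of_pos (by norm_num)]
  -- A: the value written into dp[t+1] equals B's
  have hpret : pyAGet preA (t + 1 - 1) = sumR dpA 1 (t + 1) % 1000000007 := by
    rw [show t + 1 - 1 = t by ring]; exact hpre t (by omega) (by omega)
  have hpreh : pyAGet preA ((t + 2) / 2 - 1)
      = sumR dpA 1 ((t + 2) / 2) % 1000000007 := by
    have h := hpre ((t + 2) / 2 - 1) (by omega) (by omega)
    rw [h, show (t + 2) / 2 - 1 + 1 = (t + 2) / 2 by ring]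
  have hva : PySem.Int.mod
      (pyAGet preA (t + 1 - 1) - pyAGet preA ((t + 2) / 2 - 1)) 1000000007
      = sumR dpB ((t + 2) / 2) (t + 1) % 1000000007 := by
    rw [PySem.Int.mod_eq_emod_of_pos (by norm_num), hpret, hpreh, hab, ← Int.sub_emod,
      sumR_split dpB 1 ((t + 2) / 2) (t + 1) hb1 (by omega)]
    ring_nf
  have hstepA : solveStepA (dpA, preA) (t + 1)
      = (pyASet dpA (t + 1) (sumR dpB ((t + 2) / 2) (t + 1) % 1000000007),
         pyASet preA (t + 1)
           (PySem.Int.mod (pyAGet preA (t + 1 - 1)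
              + sumR dpB ((t + 2) / 2) (t + 1) % 1000000007) 1000000007)) := by
    simp only [solveStepA, hshift]
    rw [if_pos (by exact_mod_cast hb1), hva,
      aget_aset_self _ _ _ (by omega) (by omega)]
  rw [hstepA, hstepB]
  refine ⟨by rw [hab], ?_, ?_, ?_, ?_, ?_⟩
  · show (pyASet dpA (t + 1) _).size = _
    rw [size_pyASet, hla]
  · show (pyASet preA (t + 1) _).size = _
    rw [size_pyASet, hlp]
  · show (t + 2) / 2 = (t + 1 + 1) / 2
    ring_nf
  · show sumR dpB ((t + 2) / 2) (t + 1)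
      = sumR (pyASet dpB (t + 1) _) ((t + 1 + 1) / 2) (t + 1)
    rw [sumR_setD_high _ _ _ _ _ (by omega) le_rfl,
      show t + 1 + 1 = t + 2 by ring]
  · intro i h0 hi
    by_cases hit : i ≤ t
    · rw [aget_aset_ne _ _ _ _ h0 (by omega) (by omega),
        hpre i h0 hit,
        sumR_setD_high dpA 1 (i + 1) (t + 1) _ (by omega) (by omega), hab]
    · have : i = t + 1 := by omega
      subst this
      rw [aget_aset_self _ _ _ (by omega) (by omega),
        sumR_succ_right _ _ _ (by omega : (1:Int) ≤ t + 1),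
        aget_aset_self _ _ _ (by omega) (by omega),
        sumR_setD_high _ _ _ _ _ (by omega) le_rfl,
        PySem.Int.mod_eq_emod_of_pos (by norm_num), hpret, hab]
      conv_rhs => rw [Int.add_emod]
      rw [Int.emod_emod_of_dvd _ dvd_rfl]

lemma inv_fold (k : Int) (hk : 1 ≤ k) : ∀ t : Int, 1 ≤ t → t ≤ k →
    SolveInv k t
      ((PySem.List.pyRange 2 (t + 1) 1).foldl solveStepA
        (pyASet (Array.replicate (k + 1).toNat 0) 1 1,
         pyASet (Array.replicate (k + 1).toNat 0) 1 1))
      ((PySem.List.pyRange 2 (t + 1) 1).foldl solveStepB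
        (pyASet (Array.replicate (k + 1).toNat 0) 1 1, 0, 1)) := by
  intro t ht
  induction t, ht using Int.le_induction with
  | base =>
    intro _
    rw [show (1 : Int) + 1 = 2 by ring, PySem.List.pyRange_one_eq_nil (by omega)]
    exact inv_init k hk
  | succ t ht ih =>
    intro hle
    rw [PySem.List.pyRange_one_succ_right (by omega)]
    simp only [List.foldl_append, List.foldl_cons, List.foldl_nil]
    exact inv_step k t _ _ _ _ _ ht (by omega) (ih (by omega))

-- ===== VERDICT (by name: the statement is the Claim_ definition above) =====
theorem solve_spec : Claim_equal_solve := by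
  intro k _ hk
  obtain ⟨hdp, _⟩ := inv_fold k hk k hk le_rfl
  unfold Spec_solve
  simp only [solve, solve_alt]
  rw [hdp]
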